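-- pv_equiv track=rewrite | github.com/shudhansh-shekhar-dubey/dsa-entropy | randomx/jump.py | jump_count
-- ===== SOURCE A (Python) =====
-- def jump_count(arr):
--   jump = 0
--   index = 0
--   register = []
--   while index >= 0 and index < len(arr):
--     if index not in register:
--       register.append(index)
--       index = arr[index]
--       jump += 1
--     else:
--       index = -1
--   return jump
-- ===== SOURCE B (Python) =====
-- def jump_count(arr):
--   n = len(arr)
--
--   def nxt(i):
--     return arr[i] if 0 <= i < n else None
--
--   def nxt2(i):
--     j = nxt(i)
--     return nxt(j) if j is not None else None
--
--   # Floyd tortoise-and-hare over the index chain.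
--   slow = nxt(0)
--   fast = nxt2(0)
--   while slow is not None and fast is not None and slow != fast:
--     slow = nxt(slow)
--     fast = nxt2(fast)
--   if slow is None or fast is None:
--     # the chain falls out of bounds: no cycle, count the simple path from 0
--     cnt = 0
--     i = 0
--     while 0 <= i < n:
--       i = arr[i]
--       cnt += 1
--     return cnt
--   # a cycle exists: tail length mu, then cycle length lam; answer mu + lam
--   mu = 0
--   t = 0
--   while t != fast:
--     t = arr[t]
--     fast = arr[fast]
--     mu += 1
--   lam = 1
--   h = arr[t]
--   while h != t:
--     h = arr[h]
--     lam += 1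
--   return mu + lam
-- ===== Notes on version B (the rewrite author's own statement) =====
-- stated objective: alternative
-- what changed: replaces A's visited-register walk (a linear membership scan of the register per step, quadratic in the walk length) by Floyd's tortoise-and-hare cycle detection over the index chain: if the hare falls out of bounds there is no cycle and the simple path from 0 is counted directly; otherwise the tail length mu and cycle length lam are recovered and mu+lam is returned, which equals A's count of distinct visited indices
import Mathlib
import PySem

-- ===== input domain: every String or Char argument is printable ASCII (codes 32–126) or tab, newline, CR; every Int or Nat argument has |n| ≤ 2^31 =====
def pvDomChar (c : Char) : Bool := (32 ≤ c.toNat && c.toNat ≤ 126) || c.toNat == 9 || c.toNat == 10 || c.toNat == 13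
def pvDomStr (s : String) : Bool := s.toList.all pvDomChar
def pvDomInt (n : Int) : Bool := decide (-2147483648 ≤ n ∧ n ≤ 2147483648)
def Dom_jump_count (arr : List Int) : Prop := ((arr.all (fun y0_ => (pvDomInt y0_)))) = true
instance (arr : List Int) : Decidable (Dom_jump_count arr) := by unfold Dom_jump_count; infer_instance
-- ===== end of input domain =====

-- B replaces A's visited-register walk (a membership scan per step) by Floyd's
-- tortoise-and-hare cycle detection; objective: alternative algorithm.

-- ===== PORT A =====
-- A's while-loop as fuel recursion over the same state (register, index, jump);
-- fuel arr.length+2 bounds the loop (≤ arr.length appends, one else-step, final guard).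
def jumpA (arr : List Int) (register : List Int) (index jump : Int) : Nat → Int
  | 0 => jump
  | fuel+1 =>
    if 0 ≤ index ∧ index < (arr.length : Int) then
      if index ∉ register then
        jumpA arr (register ++ [index]) ((arr[index.toNat]?).getD 0) (jump + 1) fuel
      else
        jumpA arr register (-1) jump fuel
    else jump

def jump_count (arr : List Int) : Int := jumpA arr [] 0 0 (arr.length + 2)

-- ===== PORT B =====
-- B's nxt: arr[i] if 0 <= i < n else None (in-range access, exact)
def nxtB (arr : List Int) (i : Int) : Option Int :=
  if 0 ≤ i ∧ i < (arr.length : Int) then some ((arr[i.toNat]?).getD 0) else none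

def nxt2B (arr : List Int) (i : Int) : Option Int :=
  match nxtB arr i with
  | some j => nxtB arr j
  | none => none

-- B's tortoise-and-hare loop; fuel arr.length+2 bounds it (meeting index ≤ n, escape ≤ n+1)
def phase1B (arr : List Int) (slow fast : Option Int) : Nat → Option Int × Option Int
  | 0 => (slow, fast)
  | fuel+1 =>
    match slow, fast with
    | some s, some f =>
      if s ≠ f then phase1B arr (nxtB arr s) (nxt2B arr f) fuel else (some s, some f)
    | s, f => (s, f)

-- B's no-cycle fallback: count the simple path from 0 until out of bounds
def walkB (arr : List Int) (i cnt : Int) : Nat → Int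
  | 0 => cnt
  | fuel+1 =>
    if 0 ≤ i ∧ i < (arr.length : Int) then
      walkB arr ((arr[i.toNat]?).getD 0) (cnt + 1) fuel
    else cnt

-- B's tail-length loop (mu)
def phase2B (arr : List Int) (t f mu : Int) : Nat → Int × Int
  | 0 => (t, mu)
  | fuel+1 =>
    if t ≠ f then
      phase2B arr ((arr[t.toNat]?).getD 0) ((arr[f.toNat]?).getD 0) (mu + 1) fuel
    else (t, mu)

-- B's cycle-length loop (lam)
def phase3B (arr : List Int) (t h lam : Int) : Nat → Int
  | 0 => lam
  | fuel+1 =>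
    if h ≠ t then phase3B arr t ((arr[h.toNat]?).getD 0) (lam + 1) fuel else lam

def jump_count_alt (arr : List Int) : Int :=
  match phase1B arr (nxtB arr 0) (nxt2B arr 0) (arr.length + 2) with
  | (some _, some f) =>
    let p := phase2B arr 0 f 0 (arr.length + 2)
    p.2 + phase3B arr p.1 ((arr[p.1.toNat]?).getD 0) 1 (arr.length + 2)
  | _ => walkB arr 0 0 (arr.length + 2)

-- ===== PRECONDITION & SPEC =====
def Spec_jump_count (arr : List Int) (out : Int) : Prop := out = jump_count_alt arr
instance (arr : List Int) (out : Int) : Decidable (Spec_jump_count arr out) := by unfold Spec_jump_count; infer_instance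

-- ===== CLAIM (what is proved, stated in full; the proofs are below) =====
def Claim_equal_jump_count : Prop := ∀ (arr : List Int), Dom_jump_count arr → Spec_jump_count arr (jump_count arr)

-- ===== LEMMAS AND PROOFS =====

-- the orbit of 0 under the index chain; none once the chain has fallen out of bounds
def oS (arr : List Int) : Nat → Option Int
  | 0 => some 0
  | k+1 =>
    match oS arr k with
    | some i => nxtB arr i
    | none => none

-- value of the orbit (defaults to 0 after escape; only used where the orbit is some)
def xC (arr : List Int) (k : Nat) : Int := (oS arr k).getD 0


lemma oS_succ_some (arr : List Int) {k : Nat} {i : Int} (h : oS arr k = some i) :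
    oS arr (k+1) = nxtB arr i := by simp [oS, h]

lemma oS_none_succ (arr : List Int) (k : Nat) (h : oS arr k = none) :
    oS arr (k+1) = none := by simp [oS, h]

lemma oS_none_mono (arr : List Int) {a b : Nat} (hab : a ≤ b) (h : oS arr a = none) :
    oS arr b = none := by
  obtain ⟨m, rfl⟩ := Nat.exists_eq_add_of_le hab
  induction m with
  | zero => exact h
  | succ m ih => exact oS_none_succ arr (a+m) (ih (by omega))

lemma oS_shift (arr : List Int) {i j : Nat} (h : oS arr i = oS arr j) (m : Nat) :
    oS arr (i+m) = oS arr (j+m) := by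
  induction m with
  | zero => exact h
  | succ m ih =>
    have e1 : i + (m+1) = (i+m) + 1 := by omega
    have e2 : j + (m+1) = (j+m) + 1 := by omega
    rw [e1, e2]
    simp only [oS, ih]

lemma meet_no_escape (arr : List Int) {i j c : Nat} (hij : i < j)
    (h : oS arr i = oS arr j) (hjs : oS arr j ≠ none) (hc : oS arr c = none) : False := by
  have hex : ∃ b, oS arr b = none := ⟨c, hc⟩
  classical
  set c0 := Nat.find hex with hc0def
  have hc0 : oS arr c0 = none := Nat.find_spec hex
  have hmin : ∀ b < c0, oS arr b ≠ none := fun b hb => Nat.find_min hex hb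
  have hjc : j < c0 := by
    by_contra hge
    exact hjs (oS_none_mono arr (by omega) hc0)
  have := oS_shift arr h (c0 - j)
  rw [show j + (c0 - j) = c0 by omega] at this
  rw [hc0] at this
  exact hmin (i + (c0 - j)) (by omega) this

-- ===== case E (the chain escapes): both programs return c0 - 1 =====

lemma valE (arr : List Int) {k : Nat} {i : Int} (hk : oS arr k = some i)
    (hs : oS arr (k+1) ≠ none) :
    (0 ≤ i ∧ i < (arr.length : Int)) ∧ oS arr (k+1) = some ((arr[i.toNat]?).getD 0) := by
  have h1 : oS arr (k+1) = nxtB arr i := by simp [oS, hk]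
  by_cases hv : 0 ≤ i ∧ i < (arr.length : Int)
  · exact ⟨hv, by simp [h1, nxtB, hv]⟩
  · exfalso; exact hs (by simp [h1, nxtB, hv])

lemma lastE (arr : List Int) {k : Nat} {i : Int} (hk : oS arr k = some i)
    (hn : oS arr (k+1) = none) : ¬ (0 ≤ i ∧ i < (arr.length : Int)) := by
  intro hv
  have h1 : oS arr (k+1) = nxtB arr i := by simp [oS, hk]
  rw [h1] at hn; simp [nxtB, hv] at hn

lemma distinctE (arr : List Int) {i j c : Nat} (hij : i < j)
    (hjs : oS arr j ≠ none) (hc : oS arr c = none) : oS arr i ≠ oS arr j :=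
  fun h => meet_no_escape arr hij h hjs hc

lemma cardE (arr : List Int) {c0 : Nat} (hc0 : oS arr c0 = none)
    (hmin : ∀ b < c0, oS arr b ≠ none) : c0 ≤ arr.length + 1 := by
  have key : ∀ k, k < c0 - 1 → (0 ≤ xC arr k ∧ xC arr k < (arr.length : Int)) := by
    intro k hk
    obtain ⟨i, hi⟩ := Option.ne_none_iff_exists'.mp (hmin k (by omega))
    have := (valE arr hi (hmin (k+1) (by omega))).1
    simpa [xC, hi] using this
  have hgen : ∀ u v, u < v → v < c0 - 1 → xC arr u = xC arr v → False := by
    intro u v huv hv hx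
    obtain ⟨iu, hiu⟩ := Option.ne_none_iff_exists'.mp (hmin u (by omega))
    obtain ⟨iv, hiv⟩ := Option.ne_none_iff_exists'.mp (hmin v (by omega))
    have : oS arr u = oS arr v := by
      rw [hiu, hiv]; congr 1
      simpa [xC, hiu, hiv] using hx
    exact distinctE arr huv (hmin v (by omega)) hc0 this
  have hinj : Set.InjOn (fun k => (xC arr k).toNat) ↑(Finset.range (c0-1)) := by
    intro a ha b hb hab
    simp only [Finset.coe_range, Set.mem_Iio] at ha hb
    have ha' := key a ha
    have hb' := key b hb
    have hxab : xC arr a = xC arr b := by simp only at hab; omega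
    by_contra hne
    rcases Nat.lt_or_ge a b with h | h
    · exact hgen a b h hb hxab
    · exact hgen b a (by omega) ha hxab.symm
  have hmaps : ∀ k ∈ Finset.range (c0-1), (xC arr k).toNat ∈ Finset.range arr.length := by
    intro k hk
    simp only [Finset.mem_range] at hk ⊢
    have := key k hk; omega
  have := Finset.card_le_card_of_injOn (fun k => (xC arr k).toNat) hmaps hinj
  simp only [Finset.card_range] at this
  omega

lemma A_E (arr : List Int) {c0 : Nat} (hc0 : oS arr c0 = none)
    (hmin : ∀ b < c0, oS arr b ≠ none) :
    ∀ fuel k, k < c0 → c0 - k ≤ fuel →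
      jumpA arr ((List.range k).map (xC arr)) (xC arr k) (k : Int) fuel = (c0 : Int) - 1 := by
  intro fuel
  induction fuel with
  | zero => intro k hk hf; omega
  | succ fuel ih =>
    intro k hk hf
    obtain ⟨i, hi⟩ := Option.ne_none_iff_exists'.mp (hmin k hk)
    have hxk : xC arr k = i := by simp [xC, hi]
    by_cases hlast : k + 1 = c0
    · have hnv := lastE arr hi (by rw [hlast]; exact hc0)
      rw [jumpA, hxk, if_neg hnv]
      have : ((k : Int)) = (c0 : Int) - 1 := by omega
      exact this
    · have hk1 : k + 1 < c0 := by omega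
      have hval := valE arr hi (hmin (k+1) (by omega))
      have hnm : i ∉ (List.range k).map (xC arr) := by
        simp only [List.mem_map, List.mem_range]
        rintro ⟨j, hj, hxj⟩
        have : oS arr j = oS arr k := by
          obtain ⟨ij, hij⟩ := Option.ne_none_iff_exists'.mp (hmin j (by omega))
          rw [hij, hi]; congr 1
          have h1 : xC arr j = ij := by simp [xC, hij]
          rw [← h1, hxj]
        exact distinctE arr hj (hmin k hk) hc0 this
      rw [jumpA, hxk, if_pos hval.1, if_pos hnm]
      have hreg : (List.range k).map (xC arr) ++ [i] = (List.range (k+1)).map (xC arr) := by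
        rw [List.range_succ, List.map_append, List.map_cons, List.map_nil, hxk]
      have hidx : (arr[i.toNat]?).getD 0 = xC arr (k+1) := by
        simp [xC, hval.2]
      have hjump : (k : Int) + 1 = ((k+1 : Nat) : Int) := by push_cast; ring
      rw [hreg, hidx, hjump]
      exact ih (k+1) hk1 (by omega)

lemma walk_E (arr : List Int) {c0 : Nat} (hc0 : oS arr c0 = none)
    (hmin : ∀ b < c0, oS arr b ≠ none) :
    ∀ fuel k, k < c0 → c0 - k ≤ fuel →
      walkB arr (xC arr k) (k : Int) fuel = (c0 : Int) - 1 := by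
  intro fuel
  induction fuel with
  | zero => intro k hk hf; omega
  | succ fuel ih =>
    intro k hk hf
    obtain ⟨i, hi⟩ := Option.ne_none_iff_exists'.mp (hmin k hk)
    have hxk : xC arr k = i := by simp [xC, hi]
    by_cases hlast : k + 1 = c0
    · have hnv := lastE arr hi (by rw [hlast]; exact hc0)
      rw [walkB, hxk, if_neg hnv]
      omega
    · have hval := valE arr hi (hmin (k+1) (by omega))
      rw [walkB, hxk, if_pos hval.1]
      have hidx : (arr[i.toNat]?).getD 0 = xC arr (k+1) := by simp [xC, hval.2]
      have hjump : (k : Int) + 1 = ((k+1 : Nat) : Int) := by push_cast; ring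
      rw [hidx, hjump]
      exact ih (k+1) (by omega) (by omega)

lemma phase1_E (arr : List Int) {c0 : Nat} (hc0 : oS arr c0 = none) :
    ∀ fuel k, c0 ≤ fuel + k →
      (phase1B arr (oS arr (1+k)) (oS arr (2+2*k)) fuel).1 = none ∨
      (phase1B arr (oS arr (1+k)) (oS arr (2+2*k)) fuel).2 = none := by
  intro fuel
  induction fuel with
  | zero =>
    intro k hk
    left
    simp only [phase1B]
    exact oS_none_mono arr (by omega) hc0
  | succ fuel ih =>
    intro k hk
    cases hs : oS arr (1+k) with
    | none => simp [phase1B, hs]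
    | some s =>
      cases hfst : oS arr (2+2*k) with
      | none => simp [phase1B, hs, hfst]
      | some ff =>
        have hne : s ≠ ff := by
          intro he
          apply meet_no_escape arr (i := 1+k) (j := 2+2*k) (by omega)
            (by rw [hs, hfst, he]) (by rw [hfst]; simp) hc0
        have hstep1 : nxtB arr s = oS arr (1+(k+1)) := by
          rw [show 1+(k+1) = 1+k+1 by omega, oS_succ_some arr hs]
        have hstep2 : nxt2B arr ff = oS arr (2+2*(k+1)) := by
          have h3 : oS arr (2+2*k+1) = nxtB arr ff := oS_succ_some arr hfst
          cases hn : nxtB arr ff with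
          | none =>
            have : oS arr (2+2*k+1) = none := by rw [h3, hn]
            have h4 : oS arr (2+2*(k+1)) = none := oS_none_mono arr (by omega) this
            simp [nxt2B, hn, h4]
          | some j =>
            have h5 : oS arr (2+2*k+1) = some j := by rw [h3, hn]
            have h6 : oS arr (2+2*k+1+1) = nxtB arr j := oS_succ_some arr h5
            rw [show 2+2*(k+1) = 2+2*k+1+1 by omega, h6]
            simp [nxt2B, hn]
        have hred : phase1B arr (some s) (some ff) (fuel+1)
            = phase1B arr (nxtB arr s) (nxt2B arr ff) fuel := by
          simp [phase1B, hne]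
        rw [hred, hstep1, hstep2]
        exact ih (k+1) (by omega)

-- ===== case C (the chain never escapes): both programs return mu + lam =====

lemma oS_some (arr : List Int) (hC : ∀ k, oS arr k ≠ none) (k : Nat) :
    oS arr k = some (xC arr k) := by
  cases h : oS arr k with
  | none => exact absurd h (hC k)
  | some v => simp [xC, h]

lemma xC_zero (arr : List Int) : xC arr 0 = 0 := rfl

lemma nxtC (arr : List Int) (hC : ∀ k, oS arr k ≠ none) (k : Nat) :
    nxtB arr (xC arr k) = some (xC arr (k+1)) := by
  rw [← oS_succ_some arr (oS_some arr hC k)]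
  exact oS_some arr hC (k+1)

lemma xstepC (arr : List Int) (hC : ∀ k, oS arr k ≠ none) (k : Nat) :
    (0 ≤ xC arr k ∧ xC arr k < (arr.length : Int)) ∧
      xC arr (k+1) = (arr[(xC arr k).toNat]?).getD 0 := by
  have h := nxtC arr hC k
  by_cases hv : 0 ≤ xC arr k ∧ xC arr k < (arr.length : Int)
  · refine ⟨hv, ?_⟩
    rw [nxtB, if_pos hv] at h
    exact (Option.some_inj.mp h).symm
  · rw [nxtB, if_neg hv] at h
    exact absurd h (by simp)

lemma shiftC (arr : List Int) (hC : ∀ k, oS arr k ≠ none) {i j : Nat}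
    (h : xC arr i = xC arr j) (m : Nat) : xC arr (i+m) = xC arr (j+m) := by
  have ho : oS arr i = oS arr j := by
    rw [oS_some arr hC i, oS_some arr hC j, h]
  have := oS_shift arr ho m
  simp [xC, this]

lemma perC (arr : List Int) (hC : ∀ k, oS arr k ≠ none) {mu lam : Nat}
    (hrep : xC arr mu = xC arr (mu+lam)) :
    ∀ k, mu ≤ k → ∀ m, xC arr (k + m*lam) = xC arr k := by
  intro k hk m
  induction m with
  | zero => simp
  | succ m ih =>
    have h1 : xC arr (mu + (k - mu + m*lam)) = xC arr (mu + lam + (k - mu + m*lam)) :=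
      shiftC arr hC hrep _
    rw [show mu + (k - mu + m*lam) = k + m*lam by omega] at h1
    rw [show mu + lam + (k - mu + m*lam) = k + (m+1)*lam by ring_nf; omega] at h1
    rw [← h1, ih]

lemma modC (arr : List Int) (hC : ∀ k, oS arr k ≠ none) {mu lam : Nat}
    (hrep : xC arr mu = xC arr (mu+lam)) (hl1 : 1 ≤ lam) :
    ∀ k, mu ≤ k → xC arr k = xC arr (mu + (k - mu) % lam) := by
  intro k hk
  have hd := Nat.mod_add_div' (k - mu) lam
  have := perC arr hC hrep (mu + (k - mu) % lam) (by omega) ((k - mu) / lam)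
  rw [show mu + (k - mu) % lam + (k - mu) / lam * lam = k by omega] at this
  exact this

lemma injC (arr : List Int) (hC : ∀ k, oS arr k ≠ none) {mu lam : Nat}
    (hmumin : ∀ i < mu, ∀ p, 1 ≤ p → xC arr i ≠ xC arr (i+p))
    (hrep : xC arr mu = xC arr (mu+lam)) (hl1 : 1 ≤ lam)
    (hlmin : ∀ q, 1 ≤ q → q < lam → xC arr mu ≠ xC arr (mu+q)) :
    ∀ i j, i < j → j < mu + lam → xC arr i ≠ xC arr j := by
  intro i j hij hj hx
  have hmui : mu ≤ i := by
    by_contra hlt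
    exact hmumin i (by omega) (j - i) (by omega) (by rw [show i + (j-i) = j by omega]; exact hx)
  have h1 : xC arr (i + (mu + lam - j)) = xC arr (j + (mu + lam - j)) := shiftC arr hC hx _
  rw [show j + (mu + lam - j) = mu + lam by omega] at h1
  rw [show i + (mu + lam - j) = mu + (lam - (j - i)) by omega] at h1
  exact hlmin (lam - (j - i)) (by omega) (by omega) (h1.trans hrep.symm).symm

lemma cardC (arr : List Int) (hC : ∀ k, oS arr k ≠ none) {mu lam : Nat}
    (hinj : ∀ i j, i < j → j < mu + lam → xC arr i ≠ xC arr j) :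
    mu + lam ≤ arr.length := by
  have hval : ∀ k : Nat, 0 ≤ xC arr k ∧ xC arr k < (arr.length : Int) :=
    fun k => (xstepC arr hC k).1
  have hinj' : Set.InjOn (fun k => (xC arr k).toNat) ↑(Finset.range (mu + lam)) := by
    intro a ha b hb hab
    simp only [Finset.coe_range, Set.mem_Iio] at ha hb
    have ha' := hval a
    have hb' := hval b
    have hxab : xC arr a = xC arr b := by simp only at hab; omega
    by_contra hne
    rcases Nat.lt_or_ge a b with h | h
    · exact hinj a b h hb hxab
    · exact hinj b a (by omega) ha hxab.symm
  have hmaps : ∀ k ∈ Finset.range (mu + lam), (xC arr k).toNat ∈ Finset.range arr.length := by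
    intro k hk
    simp only [Finset.mem_range] at hk ⊢
    have := hval k; omega
  have := Finset.card_le_card_of_injOn (fun k => (xC arr k).toNat) hmaps hinj'
  simpa using this

lemma jumpA_neg (arr : List Int) (reg : List Int) (jump : Int) (fuel : Nat) :
    jumpA arr reg (-1) jump fuel = jump := by
  cases fuel with
  | zero => rfl
  | succ f =>
    rw [jumpA, if_neg]
    intro h
    omega

lemma A_C (arr : List Int) (hC : ∀ k, oS arr k ≠ none) {mu lam : Nat}
    (hinj : ∀ i j, i < j → j < mu + lam → xC arr i ≠ xC arr j)
    (hrep : xC arr mu = xC arr (mu+lam)) (hl1 : 1 ≤ lam) :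
    ∀ fuel k, k ≤ mu + lam → mu + lam + 1 - k ≤ fuel →
      jumpA arr ((List.range k).map (xC arr)) (xC arr k) (k : Int) fuel
        = ((mu + lam : Nat) : Int) := by
  intro fuel
  induction fuel with
  | zero => intro k hk hf; omega
  | succ fuel ih =>
    intro k hk hf
    have hval := (xstepC arr hC k).1
    by_cases hlast : k = mu + lam
    · have hmem : xC arr k ∈ (List.range k).map (xC arr) := by
        simp only [List.mem_map, List.mem_range]
        exact ⟨mu, by omega, by rw [hlast, ← hrep]⟩
      rw [jumpA, if_pos hval, if_neg (by simpa using hmem), jumpA_neg]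
      rw [hlast]
    · have hklt : k < mu + lam := by omega
      have hnm : xC arr k ∉ (List.range k).map (xC arr) := by
        simp only [List.mem_map, List.mem_range]
        rintro ⟨j, hj, hxj⟩
        exact hinj j k hj hklt hxj
      rw [jumpA, if_pos hval, if_pos (by simpa using hnm)]
      have hreg : (List.range k).map (xC arr) ++ [xC arr k] = (List.range (k+1)).map (xC arr) := by
        rw [List.range_succ, List.map_append, List.map_cons, List.map_nil]
      have hidx : (arr[(xC arr k).toNat]?).getD 0 = xC arr (k+1) := (xstepC arr hC k).2.symm
      have hjump : (k : Int) + 1 = ((k+1 : Nat) : Int) := by push_cast; ring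
      rw [hreg, hidx, hjump]
      exact ih (k+1) (by omega) (by omega)

lemma phase1_C (arr : List Int) (hC : ∀ k, oS arr k ≠ none) {K : Nat}
    (hM : 1 ≤ K ∧ xC arr K = xC arr (2*K))
    (hKmin : ∀ k < K, ¬ (1 ≤ k ∧ xC arr k = xC arr (2*k))) :
    ∀ fuel k, k < K → K - 1 - k ≤ fuel →
      phase1B arr (some (xC arr (1+k))) (some (xC arr (2+2*k))) fuel
        = (some (xC arr K), some (xC arr (2*K))) := by
  intro fuel
  induction fuel with
  | zero =>
    intro k hk hf
    have hkK : 1 + k = K := by omega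
    have h2 : 2 + 2*k = 2*K := by omega
    have hz : phase1B arr (some (xC arr (1+k))) (some (xC arr (2+2*k))) 0
        = (some (xC arr (1+k)), some (xC arr (2+2*k))) := rfl
    rw [hz, hkK, h2]
  | succ fuel ih =>
    intro k hk hf
    by_cases hkK : 1 + k = K
    · have h2 : 2 + 2*k = 2*K := by omega
      have heq : xC arr (1+k) = xC arr (2+2*k) := by rw [hkK, h2]; exact hM.2
      have hz : phase1B arr (some (xC arr (1+k))) (some (xC arr (2+2*k))) (fuel+1)
          = (some (xC arr (1+k)), some (xC arr (2+2*k))) := by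
        simp [phase1B, heq]
      rw [hz, hkK, h2]
    · have hne : xC arr (1+k) ≠ xC arr (2+2*k) := by
        intro he
        exact hKmin (1+k) (by omega) ⟨by omega, by rw [show 2*(1+k) = 2+2*k by ring]; exact he⟩
      have hn2 : nxt2B arr (xC arr (2+2*k)) = some (xC arr (2+2*(k+1))) := by
        rw [nxt2B, nxtC arr hC]
        show nxtB arr (xC arr (2+2*k+1)) = some (xC arr (2+2*(k+1)))
        rw [nxtC arr hC, show 2+2*k+1+1 = 2+2*(k+1) from by omega]
      have hz : phase1B arr (some (xC arr (1+k))) (some (xC arr (2+2*k))) (fuel+1)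
          = phase1B arr (nxtB arr (xC arr (1+k))) (nxt2B arr (xC arr (2+2*k))) fuel := by
        simp [phase1B, hne]
      rw [hz, nxtC arr hC, hn2, show 1+k+1 = 1+(k+1) by omega]
      exact ih (k+1) (by omega) (by omega)

lemma phase2_C (arr : List Int) (hC : ∀ k, oS arr k ≠ none) {mu K : Nat}
    (hmumin : ∀ i < mu, ∀ p, 1 ≤ p → xC arr i ≠ xC arr (i+p))
    (hKrep : xC arr mu = xC arr (mu+K)) (hK1 : 1 ≤ K) :
    ∀ fuel j, j ≤ mu → mu - j ≤ fuel →
      phase2B arr (xC arr j) (xC arr (j+K)) (j : Int) fuel = (xC arr mu, (mu : Int)) := by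
  intro fuel
  induction fuel with
  | zero =>
    intro j hj hf
    have : j = mu := by omega
    subst this
    rfl
  | succ fuel ih =>
    intro j hj hf
    by_cases hjmu : j = mu
    · subst hjmu
      simp [phase2B, ← hKrep]
    · have hne : xC arr j ≠ xC arr (j+K) := hmumin j (by omega) K hK1
      have hz : phase2B arr (xC arr j) (xC arr (j+K)) (j : Int) (fuel+1)
          = phase2B arr ((arr[(xC arr j).toNat]?).getD 0)
              ((arr[(xC arr (j+K)).toNat]?).getD 0) ((j : Int)+1) fuel := by
        simp [phase2B, hne]
      rw [hz, ← (xstepC arr hC j).2, ← (xstepC arr hC (j+K)).2]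
      have hjump : (j : Int) + 1 = ((j+1 : Nat) : Int) := by push_cast; ring
      rw [hjump, show j + K + 1 = (j+1) + K by omega]
      exact ih (j+1) (by omega) (by omega)

lemma phase3_C (arr : List Int) (hC : ∀ k, oS arr k ≠ none) {mu lam : Nat}
    (hrep : xC arr mu = xC arr (mu+lam))
    (hlmin : ∀ q, 1 ≤ q → q < lam → xC arr mu ≠ xC arr (mu+q)) :
    ∀ fuel p, 1 ≤ p → p ≤ lam → lam - p ≤ fuel →
      phase3B arr (xC arr mu) (xC arr (mu+p)) (p : Int) fuel = (lam : Int) := by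
  intro fuel
  induction fuel with
  | zero =>
    intro p h1 h2 hf
    have : p = lam := by omega
    subst this
    rfl
  | succ fuel ih =>
    intro p h1 h2 hf
    by_cases hpl : p = lam
    · subst hpl
      simp [phase3B, ← hrep]
    · have hne : xC arr (mu+p) ≠ xC arr mu := fun h => hlmin p h1 (by omega) h.symm
      have hz : phase3B arr (xC arr mu) (xC arr (mu+p)) (p : Int) (fuel+1)
          = phase3B arr (xC arr mu) ((arr[(xC arr (mu+p)).toNat]?).getD 0) ((p : Int)+1) fuel := by
        simp [phase3B, hne]
      rw [hz, ← (xstepC arr hC (mu+p)).2]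
      have hjump : (p : Int) + 1 = ((p+1 : Nat) : Int) := by push_cast; ring
      rw [hjump, show mu + p + 1 = mu + (p+1) by omega]
      exact ih (p+1) (by omega) (by omega) (by omega)

-- initial pointers are orbit points
lemma oS_one (arr : List Int) : oS arr 1 = nxtB arr 0 := oS_succ_some arr rfl

lemma oS_two (arr : List Int) : oS arr 2 = nxt2B arr 0 := by
  cases h : nxtB arr 0 with
  | none =>
    have h1 : oS arr 1 = none := by rw [oS_one, h]
    have h2 : oS arr 2 = none := oS_none_mono arr (by omega) h1
    simp [nxt2B, h, h2]
  | some j =>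
    have h1 : oS arr 1 = some j := by rw [oS_one, h]
    have h2 : oS arr 2 = nxtB arr j := oS_succ_some arr h1
    simp [nxt2B, h, h2]

-- ===== VERDICT (by name: the statement is the Claim_ definition above) =====
theorem jump_count_spec : Claim_equal_jump_count := by
  intro arr _
  unfold Spec_jump_count jump_count jump_count_alt
  by_cases hE : ∃ c, oS arr c = none
  · -- the chain escapes
    have hc0 : oS arr (Nat.find hE) = none := Nat.find_spec hE
    have hmin : ∀ b < Nat.find hE, oS arr b ≠ none := fun b hb => Nat.find_min hE hb
    set c0 := Nat.find hE with hc0def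
    have hc01 : 1 ≤ c0 := by
      rcases Nat.eq_zero_or_pos c0 with h | h
      · rw [h] at hc0; exact absurd hc0 (by simp [oS])
      · exact h
    have hcard := cardE arr hc0 hmin
    have hA : jumpA arr [] 0 0 (arr.length + 2) = (c0 : Int) - 1 := by
      have := A_E arr hc0 hmin (arr.length+2) 0 (by omega) (by omega)
      simpa [xC, oS] using this
    have hW : walkB arr 0 0 (arr.length + 2) = (c0 : Int) - 1 := by
      have := walk_E arr hc0 hmin (arr.length+2) 0 (by omega) (by omega)
      simpa [xC, oS] using this
    have hB1 := phase1_E arr hc0 (arr.length+2) 0 (by omega)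
    norm_num at hB1
    rw [oS_one, oS_two] at hB1
    rcases hp : phase1B arr (nxtB arr 0) (nxt2B arr 0) (arr.length+2) with ⟨s, ff⟩
    rw [hp] at hB1
    cases s with
    | none => rw [hA, hW]
    | some sv =>
      cases ff with
      | none => rw [hA, hW]
      | some fv => simp at hB1
  · -- the chain never escapes: there is a cycle
    have hC : ∀ k, oS arr k ≠ none := fun k h => hE ⟨k, h⟩
    have hval : ∀ k, 0 ≤ xC arr k ∧ xC arr k < (arr.length : Int) :=
      fun k => (xstepC arr hC k).1
    have hmaps : ∀ k ∈ Finset.range (arr.length+1),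
        (xC arr k).toNat ∈ Finset.range arr.length := by
      intro k _
      simp only [Finset.mem_range]
      have := hval k; omega
    obtain ⟨a, ha, b, hb, hab, habeq⟩ :=
      Finset.exists_ne_map_eq_of_card_lt_of_maps_to (by simp) hmaps
    have hex : ∃ i, ∃ p, 1 ≤ p ∧ xC arr i = xC arr (i+p) := by
      have hxab : xC arr a = xC arr b := by
        have := hval a; have := hval b
        have h2 : (xC arr a).toNat = (xC arr b).toNat := habeq
        omega
      rcases Nat.lt_or_ge a b with h | h
      · exact ⟨a, b - a, by omega, by rw [show a + (b-a) = b by omega]; exact hxab⟩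
      · exact ⟨b, a - b, by omega, by rw [show b + (a-b) = a by omega]; exact hxab.symm⟩
    haveI : DecidablePred (fun i => ∃ p, 1 ≤ p ∧ xC arr i = xC arr (i+p)) :=
      fun _ => Classical.dec _
    obtain ⟨p0, hp01, hp0⟩ := Nat.find_spec hex
    have hmumin : ∀ i < Nat.find hex, ∀ p, 1 ≤ p → xC arr i ≠ xC arr (i+p) :=
      fun i hi p hp hxx => Nat.find_min hex hi ⟨p, hp, hxx⟩
    set mu := Nat.find hex with hmudef
    have hexQ : ∃ q, xC arr mu = xC arr (mu+(q+1)) :=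
      ⟨p0 - 1, by rw [show p0 - 1 + 1 = p0 by omega]; exact hp0⟩
    have hrep : xC arr mu = xC arr (mu + (Nat.find hexQ + 1)) := Nat.find_spec hexQ
    set lam := Nat.find hexQ + 1 with hlamdef
    have hl1 : 1 ≤ lam := by omega
    have hlmin : ∀ q, 1 ≤ q → q < lam → xC arr mu ≠ xC arr (mu+q) := by
      intro q h1 h2 hxx
      exact Nat.find_min hexQ (show q - 1 < Nat.find hexQ by omega)
        (by rw [show q - 1 + 1 = q by omega]; exact hxx)
    have hinj := injC arr hC hmumin hrep hl1 hlmin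
    have hcard := cardC arr hC hinj
    have hper := perC arr hC hrep
    -- the meeting point K
    have hdm := Nat.mod_add_div mu lam
    have hmlt : mu % lam < lam := Nat.mod_lt _ (by omega)
    have hK0eq : lam * (mu / lam + 1) = lam * (mu / lam) + lam := by rw [Nat.mul_succ]
    have hMK0 : 1 ≤ lam * (mu / lam + 1) ∧
        xC arr (lam * (mu / lam + 1)) = xC arr (2 * (lam * (mu / lam + 1))) := by
      refine ⟨by omega, ?_⟩
      have h1 := hper (lam * (mu / lam + 1)) (by omega) (mu / lam + 1)
      rw [show lam * (mu / lam + 1) + (mu / lam + 1) * lam = 2 * (lam * (mu / lam + 1)) by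
        rw [Nat.mul_comm (mu / lam + 1) lam]; ring] at h1
      exact h1.symm
    have hexM : ∃ k, 1 ≤ k ∧ xC arr k = xC arr (2*k) := ⟨lam * (mu / lam + 1), hMK0⟩
    have hMK : 1 ≤ Nat.find hexM ∧ xC arr (Nat.find hexM) = xC arr (2 * Nat.find hexM) :=
      Nat.find_spec hexM
    have hKmin : ∀ k < Nat.find hexM, ¬(1 ≤ k ∧ xC arr k = xC arr (2*k)) :=
      fun k hk => Nat.find_min hexM hk
    set K := Nat.find hexM with hKdef
    have hKle : K ≤ lam * (mu / lam + 1) := Nat.find_le hMK0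
    have hKlemu : K ≤ mu + lam := by omega
    have hmuK : mu ≤ K := by
      by_contra hlt
      exact hmumin K (by omega) K hMK.1 (by rw [show K + K = 2*K by ring]; exact hMK.2)
    have hdvd : lam ∣ K := by
      have e1 := modC arr hC hrep hl1 K hmuK
      have e2 := modC arr hC hrep hl1 (2*K) (by omega)
      have hrl1 : (K - mu) % lam < lam := Nat.mod_lt _ (by omega)
      have hrl2 : (2*K - mu) % lam < lam := Nat.mod_lt _ (by omega)
      have e3 : xC arr (mu + (K - mu) % lam) = xC arr (mu + (2*K - mu) % lam) := by
        rw [← e1, ← e2]; exact hMK.2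
      have heqr : (K - mu) % lam = (2*K - mu) % lam := by
        by_contra hne
        rcases Nat.lt_or_ge ((K - mu) % lam) ((2*K - mu) % lam) with h | h
        · exact hinj _ _ (by omega) (by omega) e3
        · exact hinj _ _ (by omega) (by omega) e3.symm
      have hmodeq : Nat.ModEq lam (K - mu) (2*K - mu) := heqr
      have hh := (Nat.modEq_iff_dvd' (by omega)).mp hmodeq
      rw [show 2*K - mu - (K - mu) = K by omega] at hh
      exact hh
    have hKrep : xC arr mu = xC arr (mu + K) := by
      obtain ⟨c, hc⟩ := hdvd
      have h1 := hper mu (le_refl mu) c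
      rw [show mu + c * lam = mu + K by rw [hc, Nat.mul_comm]] at h1
      exact h1.symm
    -- A's walk
    have hA : jumpA arr [] 0 0 (arr.length+2) = ((mu + lam : Nat) : Int) := by
      have := A_C arr hC hinj hrep hl1 (arr.length+2) 0 (by omega) (by omega)
      simpa [xC] using this
    -- B's phases
    have hs1 : nxtB arr 0 = some (xC arr 1) := by rw [← oS_one]; exact oS_some arr hC 1
    have hs2 : nxt2B arr 0 = some (xC arr 2) := by rw [← oS_two]; exact oS_some arr hC 2
    have hp1 := phase1_C arr hC hMK hKmin (arr.length+2) 0 (by omega) (by omega)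
    norm_num at hp1
    have hp2 := phase2_C arr hC hmumin hKrep hMK.1 (arr.length+2) 0 (by omega) (by omega)
    norm_num [xC_zero] at hp2
    have hp3 := phase3_C arr hC hrep hlmin (arr.length+2) 1 (le_refl 1) hl1 (by omega)
    norm_num at hp3
    have hfK : xC arr (2*K) = xC arr K := hMK.2.symm
    rw [hs1, hs2, hp1]
    show (jumpA arr [] 0 0 (arr.length+2))
        = (phase2B arr 0 (xC arr (2*K)) 0 (arr.length+2)).2
          + phase3B arr (phase2B arr 0 (xC arr (2*K)) 0 (arr.length+2)).1
              ((arr[((phase2B arr 0 (xC arr (2*K)) 0 (arr.length+2)).1).toNat]?).getD 0) 1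
              (arr.length+2)
    rw [hfK, hp2]
    show jumpA arr [] 0 0 (arr.length+2)
        = (mu : Int) + phase3B arr (xC arr mu) ((arr[(xC arr mu).toNat]?).getD 0) 1 (arr.length+2)
    rw [← (xstepC arr hC mu).2, hp3, hA]
    push_cast
    ring
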